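-- pv_equiv track=rewrite | github.com/awfl-us/cli | events/workspace.py | _normalize_remote
-- ===== SOURCE A (Python) =====
-- def _normalize_remote(remote: str) -> str:
--     if not remote:
--         return ""
--     r = remote.strip()
--     prefixes = [
--         "git@",
--         "https://",
--         "http://",
--         "ssh://",
--         "git://",
--     ]
--     for p in prefixes:
--         if r.startswith(p):
--             r = r[len(p):]
--             break
--     # Important: keep suffixes (like .git) as-is per service contract
--     return r
-- ===== SOURCE B (Python) =====
-- def _normalize_remote(remote: str) -> str:
--     r = remote.strip()
--     head, sep, tail = r.partition("://")
--     if sep and head in ("https", "http", "ssh", "git"):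
--         return tail
--     if r.startswith("git@"):
--         return r[4:]
--     return r
-- ===== Notes on version B (the rewrite author's own statement) =====
-- stated objective: idiomatic
-- what changed: Replaces the prefix-list loop with a single str.partition at the first '://' (scheme checked by set membership) plus one separate 'git@' check.
import Mathlib
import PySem

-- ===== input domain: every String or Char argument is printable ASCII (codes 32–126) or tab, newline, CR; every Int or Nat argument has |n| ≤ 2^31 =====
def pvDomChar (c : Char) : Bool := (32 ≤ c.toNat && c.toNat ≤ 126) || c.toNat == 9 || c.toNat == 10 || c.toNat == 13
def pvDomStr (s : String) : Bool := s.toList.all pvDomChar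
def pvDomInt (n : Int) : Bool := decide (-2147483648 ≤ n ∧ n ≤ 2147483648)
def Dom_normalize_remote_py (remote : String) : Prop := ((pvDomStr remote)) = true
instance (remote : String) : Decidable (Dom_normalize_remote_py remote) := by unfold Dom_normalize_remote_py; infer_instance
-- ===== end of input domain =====

-- B replaces A's prefix loop by a single partition at the first "://" (plus one "git@" check); objective: simpler/idiomatic, same cost.

-- ===== PORT A =====
-- A: guard on empty, strip, then scan the prefix list, stripping the first match (break).
def normalize_remote_py (remote : String) : String :=
  if remote = "" then ""
  else
    let r := PySem.Str.strip remote
    let prefixes : List String := ["git@", "https://", "http://", "ssh://", "git://"]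
    -- the for-loop with break: state (current r, broken?)
    (prefixes.foldl (fun (st : String × Bool) p =>
        if st.2 then st
        else if PySem.Str.startswith st.1 p then
          (PySem.Str.slice st.1 (some (PySem.Str.len p : Int)) none, true)
        else st) (r, false)).1

-- ===== PORT B =====
-- str.partition("://"): split at the FIRST occurrence; none = separator absent.
def pvPartition321 : List Char → Option (List Char × List Char)
  | ':' :: '/' :: '/' :: rest => some ([], rest)
  | c :: cs => (pvPartition321 cs).map (fun ht => (c :: ht.1, ht.2))
  | [] => none

def normalize_remote_py_alt (remote : String) : String :=
  let r := PySem.Str.strip remote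
  match pvPartition321 r.toList with
  | some (h, t) =>
      if h = "https".toList ∨ h = "http".toList ∨ h = "ssh".toList ∨ h = "git".toList then
        String.ofList t
      else if PySem.Str.startswith r "git@" then PySem.Str.slice r (some 4) none
      else r
  | none =>
      if PySem.Str.startswith r "git@" then PySem.Str.slice r (some 4) none
      else r

-- ===== PRECONDITION & SPEC =====
def Spec_normalize_remote_py (remote : String) (out : String) : Prop := out = normalize_remote_py_alt remote
instance (remote : String) (out : String) : Decidable (Spec_normalize_remote_py remote out) := by unfold Spec_normalize_remote_py; infer_instance

-- ===== CLAIM (what is proved, stated in full; the proofs are below) =====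
def Claim_equal_normalize_remote_py : Prop := ∀ (remote : String), Dom_normalize_remote_py remote → Spec_normalize_remote_py remote (normalize_remote_py remote)

-- ===== LEMMAS AND PROOFS =====

theorem pvPartition321_some {l h t : List Char} (hp : pvPartition321 l = some (h, t)) :
    l = h ++ ':' :: '/' :: '/' :: t := by
  fun_induction pvPartition321 l generalizing h t with
  | case1 rest => simp at hp; obtain ⟨rfl, rfl⟩ := hp; rfl
  | case2 c cs hne ih =>
    simp only [Option.map_eq_some_iff] at hp
    obtain ⟨⟨h', t'⟩, hps, he⟩ := hp
    cases he
    simpa using ih hps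
  | case3 => simp at hp

theorem sw_ex {r p : String} (h : PySem.Str.startswith r p = true) :
    ∃ m, r.toList = p.toList ++ m := by
  rw [PySem.Str.startswith_eq, PySem.Chars.startswith_iff] at h
  obtain ⟨m, hm⟩ := h
  exact ⟨m, hm.symm⟩

theorem slice_drop (r : String) (k : Nat) :
    PySem.Str.slice r (some (k : Int)) none = String.ofList (r.toList.drop k) := by
  apply String.toList_inj.mp
  simp [PySem.Str.toList_slice, PySem.Chars.slice_eq_listSlice, PySem.List.slice_from_natCast]

theorem core_eq (r : String) :
    (( ["git@", "https://", "http://", "ssh://", "git://"].foldl (fun (st : String × Bool) p =>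
        if st.2 then st
        else if PySem.Str.startswith st.1 p then
          (PySem.Str.slice st.1 (some (PySem.Str.len p : Int)) none, true)
        else st) (r, false)).1)
    = (match pvPartition321 r.toList with
      | some (h, t) =>
          if h = "https".toList ∨ h = "http".toList ∨ h = "ssh".toList ∨ h = "git".toList then
            String.ofList t
          else if PySem.Str.startswith r "git@" then PySem.Str.slice r (some 4) none
          else r
      | none =>
          if PySem.Str.startswith r "git@" then PySem.Str.slice r (some 4) none
          else r) := by
  by_cases hg : PySem.Str.startswith r "git@" = true
  · -- A strips "git@"; B's partition head can be no scheme here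
    obtain ⟨m, hm⟩ := sw_ex hg
    have hg' : PySem.Chars.startswith r.toList ['g','i','t','@'] = true := by
      simpa [PySem.Str.startswith_eq] using hg
    have hA : (( ["git@", "https://", "http://", "ssh://", "git://"].foldl (fun (st : String × Bool) p =>
        if st.2 then st
        else if PySem.Str.startswith st.1 p then
          (PySem.Str.slice st.1 (some (PySem.Str.len p : Int)) none, true)
        else st) (r, false)).1) = PySem.Str.slice r (some 4) none := by
      simp [List.foldl, hg', PySem.Str.len]
    rw [hA]
    cases hp : pvPartition321 r.toList with
    | none => simp [hg']
    | some ht =>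
      obtain ⟨h, t⟩ := ht
      have hd := pvPartition321_some hp
      have hns : ¬ (h = (['h','t','t','p','s'] : List Char) ∨ h = ['h','t','t','p'] ∨
          h = ['s','s','h'] ∨ h = ['g','i','t']) := by
        rintro (rfl | rfl | rfl | rfl) <;> (rw [hm] at hd; simp_all)
      simp [hns, hg']
  · have hg' : PySem.Chars.startswith r.toList ['g','i','t','@'] = false := by
      simpa [PySem.Str.startswith_eq] using hg
    by_cases h1 : PySem.Str.startswith r "https://" = true
    · obtain ⟨m, hm⟩ := sw_ex h1
      have h1' : PySem.Chars.startswith r.toList ['h','t','t','p','s',':','/','/'] = true := by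
        simpa [PySem.Str.startswith_eq] using h1
      have hp : pvPartition321 r.toList = some ("https".toList, m) := by
        rw [hm]; simp [pvPartition321]
      rw [hp]
      have hs := slice_drop r 8
      norm_num at hs
      simp [List.foldl, hg', h1', PySem.Str.len, hs]
      rw [hm]
      simp
    · have h1' : PySem.Chars.startswith r.toList ['h','t','t','p','s',':','/','/'] = false := by
        simpa [PySem.Str.startswith_eq] using h1
      by_cases h2 : PySem.Str.startswith r "http://" = true
      · obtain ⟨m, hm⟩ := sw_ex h2
        have h2' : PySem.Chars.startswith r.toList ['h','t','t','p',':','/','/'] = true := by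
          simpa [PySem.Str.startswith_eq] using h2
        have hp : pvPartition321 r.toList = some ("http".toList, m) := by
          rw [hm]; simp [pvPartition321]
        rw [hp]
        have hs := slice_drop r 7
        norm_num at hs
        simp [List.foldl, hg', h1', h2', PySem.Str.len, hs]
        rw [hm]
        simp
      · have h2' : PySem.Chars.startswith r.toList ['h','t','t','p',':','/','/'] = false := by
          simpa [PySem.Str.startswith_eq] using h2
        by_cases h3 : PySem.Str.startswith r "ssh://" = true
        · obtain ⟨m, hm⟩ := sw_ex h3
          have h3' : PySem.Chars.startswith r.toList ['s','s','h',':','/','/'] = true := by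
            simpa [PySem.Str.startswith_eq] using h3
          have hp : pvPartition321 r.toList = some ("ssh".toList, m) := by
            rw [hm]; simp [pvPartition321]
          rw [hp]
          have hs := slice_drop r 6
          norm_num at hs
          simp [List.foldl, hg', h1', h2', h3', PySem.Str.len, hs]
          rw [hm]
          simp
        · have h3' : PySem.Chars.startswith r.toList ['s','s','h',':','/','/'] = false := by
            simpa [PySem.Str.startswith_eq] using h3
          by_cases h4 : PySem.Str.startswith r "git://" = true
          · obtain ⟨m, hm⟩ := sw_ex h4
            have h4' : PySem.Chars.startswith r.toList ['g','i','t',':','/','/'] = true := by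
              simpa [PySem.Str.startswith_eq] using h4
            have hp : pvPartition321 r.toList = some ("git".toList, m) := by
              rw [hm]; simp [pvPartition321]
            rw [hp]
            have hs := slice_drop r 6
            norm_num at hs
            simp [List.foldl, hg', h1', h2', h3', h4', PySem.Str.len, hs]
            rw [hm]
            simp
          · have h4' : PySem.Chars.startswith r.toList ['g','i','t',':','/','/'] = false := by
              simpa [PySem.Str.startswith_eq] using h4
            have hA : (( ["git@", "https://", "http://", "ssh://", "git://"].foldl (fun (st : String × Bool) p =>
                if st.2 then st
                else if PySem.Str.startswith st.1 p then
                  (PySem.Str.slice st.1 (some (PySem.Str.len p : Int)) none, true)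
                else st) (r, false)).1) = r := by
              simp [List.foldl, hg', h1', h2', h3', h4']
            rw [hA]
            cases hp : pvPartition321 r.toList with
            | none => simp [hg']
            | some ht =>
              obtain ⟨h, t⟩ := ht
              have hd := pvPartition321_some hp
              have hns : ¬ (h = (['h','t','t','p','s'] : List Char) ∨ h = ['h','t','t','p'] ∨
                  h = ['s','s','h'] ∨ h = ['g','i','t']) := by
                rintro (rfl | rfl | rfl | rfl)
                · rw [hd] at h1'
                  have hT : PySem.Chars.startswith ((['h','t','t','p','s'] : List Char) ++ ':'::'/'::'/'::t) ['h','t','t','p','s',':','/','/'] = true := by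
                    rw [PySem.Chars.startswith_iff]; exact ⟨t, by simp⟩
                  rw [hT] at h1'; simp at h1'
                · rw [hd] at h2'
                  have hT : PySem.Chars.startswith ((['h','t','t','p'] : List Char) ++ ':'::'/'::'/'::t) ['h','t','t','p',':','/','/'] = true := by
                    rw [PySem.Chars.startswith_iff]; exact ⟨t, by simp⟩
                  rw [hT] at h2'; simp at h2'
                · rw [hd] at h3'
                  have hT : PySem.Chars.startswith ((['s','s','h'] : List Char) ++ ':'::'/'::'/'::t) ['s','s','h',':','/','/'] = true := by
                    rw [PySem.Chars.startswith_iff]; exact ⟨t, by simp⟩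
                  rw [hT] at h3'; simp at h3'
                · rw [hd] at h4'
                  have hT : PySem.Chars.startswith ((['g','i','t'] : List Char) ++ ':'::'/'::'/'::t) ['g','i','t',':','/','/'] = true := by
                    rw [PySem.Chars.startswith_iff]; exact ⟨t, by simp⟩
                  rw [hT] at h4'; simp at h4'
              simp [hns, hg']

-- ===== VERDICT (by name: the statement is the Claim_ definition above) =====
theorem normalize_remote_py_spec : Claim_equal_normalize_remote_py := by
  intro remote _
  unfold Spec_normalize_remote_py normalize_remote_py normalize_remote_py_alt
  by_cases h : remote = ""
  · subst h; decide
  · simp only [if_neg h]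
    exact core_eq _
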